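-- pv_equiv track=rewrite | github.com/GerSchroeder37/parcialesip | com10_2024/ejercicio2.py | doblete
-- ===== SOURCE A (Python) =====
-- def doblete(numero) :
--     suma_divisores = 0
--     suma_digitos = 0
--     for i in range(1,numero) :
--         if numero % i == 0 :
--             suma_divisores += i
--     for num in str(numero) :
--         suma_digitos += int(num)
--     suma_digitos = suma_digitos * 2
--     if suma_digitos == suma_divisores :
--         return True
--     return False
-- ===== SOURCE B (Python) =====
-- def doblete(numero):
--     # sum of proper divisors via divisor pairs up to sqrt(numero)
--     if numero <= 1:
--         suma_div = 0
--     else: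
--         suma_div = 1
--         i = 2
--         while i * i <= numero:
--             if numero % i == 0:
--                 suma_div += i
--                 j = numero // i
--                 if j != i:
--                     suma_div += j
--             i += 1
--     suma_dig = sum(int(d) for d in str(numero))
--     return 2 * suma_dig == suma_div
-- ===== Notes on version B (the rewrite author's own statement) =====
-- stated objective: faster
-- what changed: A sums proper divisors by trial division over every i in range(1, numero); B sums divisor pairs (i, numero//i) only up to sqrt(numero), turning the O(n) scan into an O(sqrt(n)) loop.
import Mathlib
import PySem

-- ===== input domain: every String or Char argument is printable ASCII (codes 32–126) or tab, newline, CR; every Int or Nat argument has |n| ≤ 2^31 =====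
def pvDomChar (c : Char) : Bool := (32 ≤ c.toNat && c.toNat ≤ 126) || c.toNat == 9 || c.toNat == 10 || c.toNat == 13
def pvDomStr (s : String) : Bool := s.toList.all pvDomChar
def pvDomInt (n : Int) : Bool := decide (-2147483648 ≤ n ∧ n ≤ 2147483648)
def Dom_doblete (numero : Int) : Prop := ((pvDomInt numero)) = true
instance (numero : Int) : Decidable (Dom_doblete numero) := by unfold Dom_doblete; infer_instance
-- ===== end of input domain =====

-- B replaces A's O(n) trial division over range(1, n) by the O(√n) divisor-pair loop up to √n.

-- ===== PORT A =====
-- int(num) on a char of str(numero): exact for digits; '-' (numero < 0) makes Python raise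
-- ValueError (ofStr? = none), which Pre_doblete excludes — the .getD 0 default is never the value claimed.
def doblete (numero : Int) : Bool :=
  let suma_divisores : Int := (PySem.List.pyRange 1 numero 1).foldl
    (fun s i => if PySem.Int.mod numero i == 0 then s + i else s) 0
  let suma_digitos : Int := (PySem.Int.toChars numero).foldl
    (fun s c => s + (PySem.Int.ofStr? (String.mk [c])).getD 0) 0
  let suma_digitos := suma_digitos * 2
  if suma_digitos == suma_divisores then true else false

-- ===== PORT B =====
-- the while-loop of Source B: i = 2; while i*i <= numero: …; i += 1
def dobleteAltLoop (numero : Int) (i : Nat) (acc : Int) : Int :=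
  if h : (i : Int) * i ≤ numero then
    let acc' : Int :=
      if PySem.Int.mod numero i == 0 then
        let j := PySem.Int.floordiv numero i
        if j ≠ (i : Int) then acc + i + j else acc + i
      else acc
    dobleteAltLoop numero (i + 1) acc'
  else acc
termination_by (numero + 1 - i * i).toNat
decreasing_by
  have h2 : ((i : Int) + 1) * ((i : Int) + 1) = (i : Int) * i + 2 * i + 1 := by ring
  have h3 : (0 : Int) ≤ (i : Int) := Int.natCast_nonneg i
  push_cast
  omega

def doblete_alt (numero : Int) : Bool :=
  let suma_div : Int := if numero ≤ 1 then 0 else dobleteAltLoop numero 2 1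
  let suma_dig : Int :=
    ((PySem.Int.toChars numero).map (fun d => (PySem.Int.ofStr? (String.mk [d])).getD 0)).sum
  2 * suma_dig == suma_div

-- ===== PRECONDITION & SPEC =====
-- Pre_ excludes negative numero, where both Pythons raise ValueError on int('-') of the sign character.
def Pre_doblete (numero : Int) : Prop := 0 ≤ numero
instance (numero : Int) : Decidable (Pre_doblete numero) := by unfold Pre_doblete; infer_instance
def pvWitness_doblete : Int := 12

def Spec_doblete (numero : Int) (out : Bool) : Prop := out = doblete_alt numero
instance (numero : Int) (out : Bool) : Decidable (Spec_doblete numero out) := by unfold Spec_doblete; infer_instance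

-- ===== CLAIM (what is proved, stated in full; the proofs are below) =====
def Claim_equal_doblete : Prop := ∀ (numero : Int), Dom_doblete numero → Pre_doblete numero → Spec_doblete numero (doblete numero)

-- ===== LEMMAS AND PROOFS =====

-- A's digit loop (foldl with +) equals B's map-then-sum.
theorem foldl_add_map (f : Char → Int) :
    ∀ (l : List Char) (acc : Int),
      l.foldl (fun s c => s + f c) acc = acc + (l.map f).sum := by
  intro l
  induction l with
  | nil => intro acc; simp
  | cons c t ih => intro acc; simp [List.foldl, ih]; ring

-- foldl with a conditional add equals init + a Finset.range sum, for a list (List.range m).map f.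
theorem foldl_if_range (f : Nat → Int) (p : Int → Bool) :
    ∀ (m : Nat) (acc : Int),
      (List.range m).foldl (fun s k => if p (f k) then s + f k else s) acc
        = acc + ∑ k ∈ Finset.range m, (if p (f k) then f k else 0) := by
  intro m
  induction m with
  | zero => intro acc; simp
  | succ m ih =>
      intro acc
      rw [List.range_succ, List.foldl_append, Finset.sum_range_succ, ih]
      by_cases hp : p (f m) = true <;> simp [hp] <;> ring

-- A's divisor sum as an Int-valued Finset sum over Ico 1 n.
theorem sumA_eq (n : Nat) :
    (PySem.List.pyRange 1 (n : Int) 1).foldl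
        (fun s i => if PySem.Int.mod (n : Int) i == 0 then s + i else s) 0
      = ∑ d ∈ Finset.Ico 1 n, (if d ∣ n then (d : Int) else 0) := by
  rw [PySem.List.pyRange_one, List.foldl_map,
      foldl_if_range (fun k => 1 + (k : Int)) (fun i => PySem.Int.mod (n : Int) i == 0),
      Finset.sum_Ico_eq_sum_range]
  have hlen : ((n : Int) - 1).toNat = n - 1 := by omega
  rw [hlen, zero_add]
  apply Finset.sum_congr rfl
  intro k _
  have hcast : (1 : Int) + (k : Int) = ((1 + k : Nat) : Int) := by push_cast; ring
  by_cases hdvd : (1 + k) ∣ n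
  · have : PySem.Int.mod (n : Int) (1 + (k : Int)) = 0 := by
      rw [PySem.Int.mod_eq_zero_iff_dvd, hcast]
      exact_mod_cast hdvd
    have hb : (PySem.Int.mod (n : Int) (1 + (k : Int)) == 0) = true := by rw [this]; rfl
    rw [if_pos hb, if_pos hdvd]
    exact hcast
  · have : ¬ PySem.Int.mod (n : Int) (1 + (k : Int)) = 0 := by
      rw [PySem.Int.mod_eq_zero_iff_dvd, hcast]
      exact_mod_cast hdvd
    have hb : ¬ (PySem.Int.mod (n : Int) (1 + (k : Int)) == 0) = true := by simp [this]
    rw [if_neg hb, if_neg hdvd]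

-- The value added by the loop body at divisor d, written as two conditional pieces.
-- B's loop computes the ``small divisors`` part of the sum.
theorem loop_eq (n : Nat) (hn : 2 ≤ n) :
    ∀ (fuel : Nat) (i : Nat) (acc : Int), 2 ≤ i → n + 1 - i * i ≤ fuel →
      dobleteAltLoop (n : Int) i acc
        = acc + ∑ d ∈ Finset.Ico i n,
            (if d ∣ n ∧ d * d ≤ n then (if d * d = n then (d : Int) else (d : Int) + ((n / d : Nat) : Int)) else 0) := by
  intro fuel
  induction fuel with
  | zero =>
      intro i acc hi2 hfuel
      have hgt : n < i * i := by omega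
      have hgtI : ¬ ((i : Int) * i ≤ (n : Int)) := by exact_mod_cast Nat.not_le.mpr hgt
      rw [dobleteAltLoop, dif_neg hgtI]
      rw [Finset.sum_eq_zero, add_zero]
      intro d hd
      have hd' := Finset.mem_Ico.mp hd
      have : n < d * d := lt_of_lt_of_le hgt (Nat.mul_le_mul hd'.1 hd'.1)
      rw [if_neg]
      rintro ⟨-, hle⟩; omega
  | succ f ih =>
      intro i acc hi2 hfuel
      by_cases hle : ((i : Int) * i ≤ (n : Int))
      · have hleN : i * i ≤ n := by exact_mod_cast hle
        have hiltn : i < n := by nlinarith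
        have hsq : (i + 1) * (i + 1) = i * i + 2 * i + 1 := by ring
        rw [dobleteAltLoop, dif_pos hle]
        rw [ih (i + 1) _ (by omega) (by omega), Finset.sum_eq_sum_Ico_succ_bot hiltn]
        have hmod : PySem.Int.mod (n : Int) (i : Int) = ((n % i : Nat) : Int) :=
          PySem.Int.mod_natCast n i
        have hdiv : PySem.Int.floordiv (n : Int) (i : Int) = ((n / i : Nat) : Int) :=
          PySem.Int.floordiv_natCast n i
        by_cases hdvd : i ∣ n
        · have hm0 : (PySem.Int.mod (n : Int) (i : Int) == 0) = true := by
            rw [hmod]; simp [Nat.mod_eq_zero_of_dvd hdvd]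
          by_cases heq : i * i = n
          · have hq : n / i = i := by
              rw [Nat.div_eq_iff_eq_mul_left (by omega) hdvd]; omega
            rw [if_pos hm0, hdiv, hq]
            simp only [ne_eq, not_true_eq_false, if_false]
            rw [if_pos ⟨hdvd, hleN⟩, if_pos heq]
            ring
          · have hq : n / i ≠ i := by
              rw [ne_eq, Nat.div_eq_iff_eq_mul_left (by omega) hdvd]; omega
            have hqI : ((n / i : Nat) : Int) ≠ (i : Int) := by exact_mod_cast hq
            rw [if_pos hm0, hdiv, if_pos hqI]
            rw [if_pos ⟨hdvd, hleN⟩, if_neg heq]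
            ring
        · have hm0 : ¬ (PySem.Int.mod (n : Int) (i : Int) == 0) = true := by
            rw [hmod]
            simp only [beq_iff_eq, Nat.cast_eq_zero]
            exact fun h => hdvd (Nat.dvd_of_mod_eq_zero h)
          rw [if_neg hm0, if_neg (by rintro ⟨h, -⟩; exact hdvd h)]
          ring
      · have hgt : n < i * i := by
          have := Nat.not_le.mp (fun h => hle (by exact_mod_cast h))
          omega
        rw [dobleteAltLoop, dif_neg hle, Finset.sum_eq_zero, add_zero]
        intro d hd
        have hd' := Finset.mem_Ico.mp hd
        have : n < d * d := lt_of_lt_of_le hgt (Nat.mul_le_mul hd'.1 hd'.1)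
        rw [if_neg]
        rintro ⟨-, h⟩; omega

-- The pairing identity: the full proper-divisor sum equals 1 + the √-bounded paired sum.
theorem pairing (n : Nat) (hn : 2 ≤ n) :
    ∑ d ∈ Finset.Ico 1 n, (if d ∣ n then (d : Int) else 0)
      = 1 + ∑ d ∈ Finset.Ico 2 n,
          (if d ∣ n ∧ d * d ≤ n then (if d * d = n then (d : Int) else (d : Int) + ((n / d : Nat) : Int)) else 0) := by
  rw [Finset.sum_eq_sum_Ico_succ_bot (show 1 < n by omega), if_pos (Nat.one_dvd n)]
  congr 1
  have hsplitL : ∀ d ∈ Finset.Ico 2 n, (if d ∣ n then (d : Int) else 0)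
      = (if d ∣ n ∧ d * d ≤ n then (d : Int) else 0)
        + (if d ∣ n ∧ n < d * d then (d : Int) else 0) := by
    intro d _
    by_cases hdvd : d ∣ n
    · by_cases hle : d * d ≤ n
      · rw [if_pos hdvd, if_pos ⟨hdvd, hle⟩, if_neg (fun h => absurd h.2 (by omega))]; ring
      · rw [if_pos hdvd, if_neg (fun h => hle h.2), if_pos ⟨hdvd, by omega⟩]; ring
    · rw [if_neg hdvd, if_neg (fun h => hdvd h.1), if_neg (fun h => hdvd h.1)]; ring
  have hsplitR : ∀ d ∈ Finset.Ico 2 n,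
      (if d ∣ n ∧ d * d ≤ n then (if d * d = n then (d : Int) else (d : Int) + ((n / d : Nat) : Int)) else 0)
      = (if d ∣ n ∧ d * d ≤ n then (d : Int) else 0)
        + (if d ∣ n ∧ d * d < n then ((n / d : Nat) : Int) else 0) := by
    intro d _
    by_cases hdvd : d ∣ n
    · by_cases hle : d * d ≤ n
      · by_cases heq : d * d = n
        · rw [if_pos ⟨hdvd, hle⟩, if_pos heq, if_pos ⟨hdvd, hle⟩,
              if_neg (fun h => absurd h.2 (by omega))]
          ring
        · rw [if_pos ⟨hdvd, hle⟩, if_neg heq, if_pos ⟨hdvd, hle⟩, if_pos ⟨hdvd, by omega⟩]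
      · rw [if_neg (fun h => hle h.2), if_neg (fun h => hle h.2),
            if_neg (fun h => hle (le_of_lt h.2))]
        ring
    · rw [if_neg (fun h => hdvd h.1), if_neg (fun h => hdvd h.1), if_neg (fun h => hdvd h.1)]
      ring
  rw [Finset.sum_congr rfl hsplitL, Finset.sum_congr rfl hsplitR,
      Finset.sum_add_distrib, Finset.sum_add_distrib]
  congr 1
  rw [← Finset.sum_filter, ← Finset.sum_filter]
  refine Finset.sum_nbij' (fun d => n / d) (fun e => n / e) ?_ ?_ ?_ ?_ ?_
  · intro a ha
    simp only [Finset.mem_filter, Finset.mem_Ico] at ha ⊢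
    obtain ⟨⟨ha2, han⟩, hdvd, hbig⟩ := ha
    have hmul : n / a * a = n := Nat.div_mul_cancel hdvd
    have hqlt : n / a < a := by nlinarith
    have hq2 : 2 ≤ n / a := by nlinarith
    refine ⟨⟨hq2, by omega⟩, Nat.div_dvd_of_dvd hdvd, ?_⟩
    nlinarith
  · intro a ha
    simp only [Finset.mem_filter, Finset.mem_Ico] at ha ⊢
    obtain ⟨⟨ha2, han⟩, hdvd, hsmall⟩ := ha
    have hmul : n / a * a = n := Nat.div_mul_cancel hdvd
    have hqgt : a < n / a := by nlinarith
    have hqn : n / a < n := Nat.div_lt_self (by omega) (by omega)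
    refine ⟨⟨by omega, hqn⟩, Nat.div_dvd_of_dvd hdvd, ?_⟩
    nlinarith
  · intro a ha
    simp only [Finset.mem_filter, Finset.mem_Ico] at ha
    exact Nat.div_div_self ha.2.1 (by omega)
  · intro a ha
    simp only [Finset.mem_filter, Finset.mem_Ico] at ha
    exact Nat.div_div_self ha.2.1 (by omega)
  · intro a ha
    simp only [Finset.mem_filter, Finset.mem_Ico] at ha
    rw [Nat.div_div_self ha.2.1 (by omega)]

theorem div_sums_eq (n : Nat) :
    (PySem.List.pyRange 1 (n : Int) 1).foldl
        (fun s i => if PySem.Int.mod (n : Int) i == 0 then s + i else s) 0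
      = (if (n : Int) ≤ 1 then 0 else dobleteAltLoop (n : Int) 2 1) := by
  by_cases hn : n ≤ 1
  · interval_cases n <;> decide
  · have hn2 : 2 ≤ n := by omega
    rw [sumA_eq, pairing n hn2,
        if_neg (by exact_mod_cast Nat.not_le.mpr (by omega : 1 < n) : ¬ (n : Int) ≤ 1),
        loop_eq n hn2 (n + 1) 2 1 (le_refl 2) (by omega)]

theorem if_beq (b : Bool) : (if b = true then true else false) = b := by
  cases b <;> simp

-- ===== VERDICT (by name: the statement is the Claim_ definition above) =====
theorem doblete_spec : Claim_equal_doblete := by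
  intro numero _ hpre
  unfold Spec_doblete doblete doblete_alt
  obtain ⟨n, rfl⟩ := Int.eq_ofNat_of_zero_le hpre
  rw [foldl_add_map, div_sums_eq]
  dsimp only
  rw [zero_add, Int.mul_comm]
  exact if_beq _
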